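-- pv_equiv track=rewrite | github.com/hkayrad/hkd-proxy | reproduce_issue.py | process_tcmb_items
-- ===== SOURCE A (Python) =====
-- def process_tcmb_items(items):
--     if not items:
--         return items
--
--     # helper to check if a value is effectively null
--     # The API might return None, "null", or empty string. The example shows null (None in python)
--
--     # We need to maintain the last known non-null value for each key
--     last_known_values = {}
--
--     # Keys to track. We can dynamically discover them or just track all keys in the first item.
--     # Dynamically tracking all keys seen so far is safer.
--
--     processed_items = []
--
--     for item in items:
--         new_item = item.copy()
--
--         for key, value in item.items():
--             # If value is present, update last_known
--             # We treat None as missing.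
--             if value is not None:
--                 last_known_values[key] = value
--
--             # If value is None, try to use last_known
--             elif key in last_known_values:
--                 new_item[key] = last_known_values[key]
--
--         processed_items.append(new_item)
--
--     return processed_items
-- ===== SOURCE B (Python) =====
-- def process_tcmb_items(items):
--     # column-major forward fill: copies first, then one pass per key
--     result = [dict(item) for item in items]
--     keys = dict.fromkeys(k for item in items for k in item)
--     for key in keys:
--         last = None
--         for i, item in enumerate(items):
--             if key in item:
--                 v = item[key]
--                 if v is not None:
--                     last = v
--                 elif last is not None:
--                     result[i][key] = last
--     return result
-- ===== Notes on version B (the rewrite author's own statement) =====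
-- stated objective: alternative
-- what changed: Row-major single pass with a running last-known dict is replaced by column-major processing: copy all items, collect the ordered set of keys once, then forward-fill each key independently over the item sequence.
import Mathlib
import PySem

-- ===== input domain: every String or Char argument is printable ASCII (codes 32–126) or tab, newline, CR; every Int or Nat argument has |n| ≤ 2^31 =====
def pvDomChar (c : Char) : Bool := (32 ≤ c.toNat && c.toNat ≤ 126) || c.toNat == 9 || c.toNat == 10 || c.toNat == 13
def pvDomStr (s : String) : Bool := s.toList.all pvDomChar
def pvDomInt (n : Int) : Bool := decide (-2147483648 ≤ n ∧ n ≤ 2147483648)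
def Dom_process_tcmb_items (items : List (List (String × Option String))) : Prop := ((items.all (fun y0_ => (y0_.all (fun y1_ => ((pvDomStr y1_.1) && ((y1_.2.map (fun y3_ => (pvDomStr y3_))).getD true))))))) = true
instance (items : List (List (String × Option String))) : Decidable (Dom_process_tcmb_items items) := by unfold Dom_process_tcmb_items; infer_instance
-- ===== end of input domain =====

-- ===== PORT A =====
-- B differs from A by decomposition: A fills row-major in one pass with a running
-- last-known dict; B copies the items and forward-fills one key (column) at a time.
-- Shared primitive: Python dict assignment d[k] = v on an association list
-- (overwrite the first binding of k in place, else append; exact for Python dicts,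
-- whose keys are unique).
def pvSetKey {a : Type} (key : String) (v : a) : List (String × a) → List (String × a)
  | [] => [(key, v)]
  | kv :: rest => if kv.1 = key then (key, v) :: rest else kv :: pvSetKey key v rest

def process_tcmb_items (items : List (List (String × Option String))) : List (List (String × Option String)) :=
  if items = [] then items else
  (items.foldl
    (fun (st : List (List (String × Option String)) × List (String × String)) item =>
      let r := item.foldl
        (fun (st2 : List (String × Option String) × List (String × String)) kv =>
          match kv.2 with
          | some v => (st2.1, pvSetKey kv.1 v st2.2)
          | none =>
            match List.lookup kv.1 st2.2 with
            | some w => (pvSetKey kv.1 (some w) st2.1, st2.2)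
            | none => st2)
        (item, st.2)
      (st.1 ++ [r.1], r.2))
    ([], [])).1

-- ===== PORT B =====
-- one forward pass over (item, row) pairs for a single key, carrying `last`
def pvFFCol (key : String) : Option String → List ((List (String × Option String)) × (List (String × Option String))) → List (List (String × Option String))
  | _, [] => []
  | last, (item, row) :: rest =>
    match List.lookup key item with
    | none => row :: pvFFCol key last rest
    | some (some v) => row :: pvFFCol key (some v) rest
    | some none =>
      match last with
      | some w => pvSetKey key (some w) row :: pvFFCol key last rest
      | none => row :: pvFFCol key none rest

def process_tcmb_items_alt (items : List (List (String × Option String))) : List (List (String × Option String)) :=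
  let keys := PySem.List.dedup (items.flatMap (fun item => item.map Prod.fst))
  keys.foldl (fun res key => pvFFCol key none (items.zip res)) items

-- ===== PRECONDITION & SPEC =====
-- Pre_ excludes association lists carrying a duplicated key inside one item: such a
-- list does not represent any Python dict (dict construction collapses duplicates),
-- so no dict input of A corresponds to it.
def Pre_process_tcmb_items (items : List (List (String × Option String))) : Prop :=
  ∀ item ∈ items, (item.map Prod.fst).Nodup

instance (items : List (List (String × Option String))) : Decidable (Pre_process_tcmb_items items) := by unfold Pre_process_tcmb_items; infer_instance

def pvWitness_process_tcmb_items : (List (List (String × Option String))) :=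
  [[("a", some "1"), ("b", none)], [("a", none), ("b", some "2")], [("a", none)]]

def Spec_process_tcmb_items (items : List (List (String × Option String))) (out : List (List (String × Option String))) : Prop := out = process_tcmb_items_alt items
instance (items : List (List (String × Option String))) (out : List (List (String × Option String))) : Decidable (Spec_process_tcmb_items items out) := by unfold Spec_process_tcmb_items; infer_instance

-- ===== CLAIM (what is proved, stated in full; the proofs are below) =====
def Claim_equal_process_tcmb_items : Prop := ∀ (items : List (List (String × Option String))), Dom_process_tcmb_items items → Pre_process_tcmb_items items → Spec_process_tcmb_items items (process_tcmb_items items)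

-- ===== LEMMAS AND PROOFS =====

-- Common specification: fill one row from a last-known map f, update f by a row,
-- and run over the rows in order.  Both ports are proved equal to pvSpecRun.
def pvFillOne (f : String → Option String) (it : List (String × Option String)) : List (String × Option String) :=
  it.map (fun kv => (kv.1, kv.2.or (f kv.1)))

def pvUpdF (f : String → Option String) (it : List (String × Option String)) : String → Option String :=
  fun k => match List.lookup k it with
  | some (some v) => some v
  | _ => f k

def pvSpecRun (f : String → Option String) : List (List (String × Option String)) → List (List (String × Option String))
  | [] => []
  | it :: rest => pvFillOne f it :: pvSpecRun (pvUpdF f it) rest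

theorem pvSpecRun_congr {f g : String → Option String} (h : ∀ k, f k = g k) :
    ∀ l, pvSpecRun f l = pvSpecRun g l := by
  intro l
  induction l generalizing f g with
  | nil => rfl
  | cons it rest ih =>
    simp only [pvSpecRun, List.cons.injEq]
    constructor
    · exact List.map_congr_left (fun kv _ => by rw [h])
    · exact ih (fun k => by
        simp only [pvUpdF]
        cases List.lookup k it with
        | none => exact h k
        | some v => cases v with
          | none => exact h k
          | some w => rfl)

theorem pv_lookup_setKey_self {a : Type} (k : String) (v : a) (d : List (String × a)) :
    List.lookup k (pvSetKey k v d) = some v := by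
  induction d with
  | nil => simp [pvSetKey]
  | cons kv rest ih =>
    by_cases h : kv.1 = k
    · simp [pvSetKey, h]
    · have hb : (k == kv.1) = false := beq_eq_false_iff_ne.mpr (fun e => h e.symm)
      simp [pvSetKey, h, List.lookup, hb, ih]

theorem pv_lookup_setKey_ne {a : Type} {k k' : String} (h : k' ≠ k) (v : a) (d : List (String × a)) :
    List.lookup k' (pvSetKey k v d) = List.lookup k' d := by
  induction d with
  | nil => simp [pvSetKey, List.lookup, beq_eq_false_iff_ne.mpr h]
  | cons kv rest ih =>
    by_cases hk : kv.1 = k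
    · subst hk
      simp [pvSetKey, List.lookup, beq_eq_false_iff_ne.mpr h]
    · simp only [pvSetKey, if_neg hk, List.lookup]
      cases e : (k' == kv.1) <;> simp [e, ih]

-- the evolving last-known dict over one row: only the non-None writes land
def pvUpdD (d : List (String × String)) (s : List (String × Option String)) : List (String × String) :=
  s.foldl (fun d kv => match kv.2 with | some v => pvSetKey kv.1 v d | none => d) d

theorem pv_lookup_updD (s : List (String × Option String)) (d : List (String × String))
    (hnd : (s.map Prod.fst).Nodup) (k : String) :
    List.lookup k (pvUpdD d s) = pvUpdF (fun j => List.lookup j d) s k := by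
  induction s generalizing d with
  | nil => rfl
  | cons kv rest ih =>
    simp only [List.map_cons, List.nodup_cons] at hnd
    obtain ⟨hk, hrest⟩ := hnd
    by_cases he : k = kv.1
    · have hb : (k == kv.1) = true := beq_iff_eq.mpr he
      have hnot : List.lookup kv.1 rest = (none : Option (Option String)) := by
        rw [List.lookup_eq_none_iff]
        intro p hp
        simp only [bne_iff_ne, ne_eq]
        exact fun e => hk (by rw [e]; exact List.mem_map_of_mem hp)
      cases hv : kv.2 with
      | some v =>
        have lhs : List.lookup k (pvUpdD d (kv :: rest)) = some v := by
          have h1 : pvUpdD d (kv :: rest) = pvUpdD (pvSetKey kv.1 v d) rest := by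
            simp [pvUpdD, hv]
          rw [h1, ih _ hrest]
          simp [pvUpdF, he, hnot, pv_lookup_setKey_self]
        rw [lhs]
        simp [pvUpdF, List.lookup, hb, hv]
      | none =>
        have lhs : List.lookup k (pvUpdD d (kv :: rest)) = List.lookup k d := by
          have h1 : pvUpdD d (kv :: rest) = pvUpdD d rest := by simp [pvUpdD, hv]
          rw [h1, ih _ hrest]
          simp [pvUpdF, he, hnot]
        rw [lhs]
        simp [pvUpdF, List.lookup, hb, hv]
    · have hb : (k == kv.1) = false := beq_eq_false_iff_ne.mpr he
      cases hv : kv.2 with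
      | some v =>
        have h1 : pvUpdD d (kv :: rest) = pvUpdD (pvSetKey kv.1 v d) rest := by
          simp [pvUpdD, hv]
        rw [h1, ih _ hrest]
        simp only [pvUpdF, List.lookup, hb]
        cases List.lookup k rest with
        | none => exact pv_lookup_setKey_ne he v d
        | some w => cases w with
          | none => exact pv_lookup_setKey_ne he v d
          | some u => rfl
      | none =>
        have h1 : pvUpdD d (kv :: rest) = pvUpdD d rest := by simp [pvUpdD, hv]
        rw [h1, ih _ hrest]
        simp only [pvUpdF, List.lookup, hb]

theorem pv_setKey_append_of_not_mem {a : Type} {k : String} {p : List (String × a)}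
    (h : k ∉ p.map Prod.fst) (v : a) (s : List (String × a)) :
    pvSetKey k v (p ++ s) = p ++ pvSetKey k v s := by
  induction p with
  | nil => rfl
  | cons kv rest ih =>
    simp only [List.map_cons, List.mem_cons, not_or] at h
    simp only [List.cons_append, pvSetKey]
    rw [if_neg (fun e => h.1 (e.symm)), ih h.2]

theorem pv_fillOne_keys (f : String → Option String) (p : List (String × Option String)) :
    (pvFillOne f p).map Prod.fst = p.map Prod.fst := by
  simp [pvFillOne, List.map_map, Function.comp_def]

-- A's inner row fold: new row = pvFillOne, last-known dict = pvUpdD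
theorem pv_innerA (s p : List (String × Option String)) (d0 : List (String × String))
    (hnd : ((p ++ s).map Prod.fst).Nodup) :
    s.foldl
      (fun (st2 : List (String × Option String) × List (String × String)) kv =>
        match kv.2 with
        | some v => (st2.1, pvSetKey kv.1 v st2.2)
        | none =>
          match List.lookup kv.1 st2.2 with
          | some w => (pvSetKey kv.1 (some w) st2.1, st2.2)
          | none => st2)
      (pvFillOne (fun k => List.lookup k d0) p ++ s, pvUpdD d0 p)
    = (pvFillOne (fun k => List.lookup k d0) (p ++ s), pvUpdD d0 (p ++ s)) := by
  induction s generalizing p with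
  | nil => simp
  | cons kv rest ih =>
    have hkp : kv.1 ∉ p.map Prod.fst := by
      simp only [List.map_append, List.nodup_append] at hnd
      exact fun hm => hnd.2.2 _ hm kv.1 (by simp) rfl
    have hlook : List.lookup kv.1 (pvUpdD d0 p) = List.lookup kv.1 d0 := by
      rw [pv_lookup_updD p d0 (by
            simp only [List.map_append, List.nodup_append] at hnd; exact hnd.1) kv.1]
      simp only [pvUpdF]
      rw [show List.lookup kv.1 p = none from by
        rw [List.lookup_eq_none_iff]
        intro q hq
        simp only [bne_iff_ne, ne_eq]
        exact fun e => hkp (by rw [e]; exact List.mem_map_of_mem hq)]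
    have hresh : ((p ++ [kv]) ++ rest).map Prod.fst |>.Nodup := by
      simpa [List.append_assoc] using hnd
    have hgoal := ih (p ++ [kv]) hresh
    rw [show (p ++ [kv]) ++ rest = p ++ kv :: rest by simp] at hgoal
    cases hv : kv.2 with
    | some v =>
      simp only [List.foldl_cons, hv]
      have h1 : pvFillOne (fun k => List.lookup k d0) (p ++ [kv]) ++ rest
          = pvFillOne (fun k => List.lookup k d0) p ++ kv :: rest := by
        simp [pvFillOne, hv, Prod.ext_iff]
      have h2 : pvUpdD d0 (p ++ [kv]) = pvSetKey kv.1 v (pvUpdD d0 p) := by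
        simp [pvUpdD, List.foldl_append, hv]
      rw [h1, h2] at hgoal
      exact hgoal
    | none =>
      simp only [List.foldl_cons, hv, hlook]
      cases hf : List.lookup kv.1 d0 with
      | none =>
        have h1 : pvFillOne (fun k => List.lookup k d0) (p ++ [kv]) ++ rest
            = pvFillOne (fun k => List.lookup k d0) p ++ kv :: rest := by
          simp [pvFillOne, hv, hf, Prod.ext_iff]
        have h2 : pvUpdD d0 (p ++ [kv]) = pvUpdD d0 p := by
          simp [pvUpdD, List.foldl_append, hv]
        rw [h1, h2] at hgoal
        exact hgoal
      | some w =>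
        have h1 : pvFillOne (fun k => List.lookup k d0) (p ++ [kv]) ++ rest
            = pvSetKey kv.1 (some w) (pvFillOne (fun k => List.lookup k d0) p ++ kv :: rest) := by
          rw [pv_setKey_append_of_not_mem (by rw [pv_fillOne_keys]; exact hkp)]
          simp [pvSetKey, pvFillOne, hv, hf, Prod.ext_iff]
        have h2 : pvUpdD d0 (p ++ [kv]) = pvUpdD d0 p := by
          simp [pvUpdD, List.foldl_append, hv]
        rw [h1, h2] at hgoal
        exact hgoal

-- A's outer fold equals the specification run
theorem pv_outerA (its : List (List (String × Option String)))
    (acc : List (List (String × Option String))) (d : List (String × String))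
    (hnd : ∀ it ∈ its, (it.map Prod.fst).Nodup) :
    (its.foldl
      (fun (st : List (List (String × Option String)) × List (String × String)) item =>
        let r := item.foldl
          (fun (st2 : List (String × Option String) × List (String × String)) kv =>
            match kv.2 with
            | some v => (st2.1, pvSetKey kv.1 v st2.2)
            | none =>
              match List.lookup kv.1 st2.2 with
              | some w => (pvSetKey kv.1 (some w) st2.1, st2.2)
              | none => st2)
          (item, st.2)
        (st.1 ++ [r.1], r.2))
      (acc, d)).1
    = acc ++ pvSpecRun (fun k => List.lookup k d) its := by
  induction its generalizing acc d with
  | nil => simp [pvSpecRun]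
  | cons item rest ih =>
    have hitem : (item.map Prod.fst).Nodup := hnd item (by simp)
    have hinner := pv_innerA item [] d (by simpa using hitem)
    rw [show (pvFillOne (fun k => List.lookup k d) [] ++ item, pvUpdD d [])
        = ((item, d) : List (String × Option String) × List (String × String)) from rfl] at hinner
    simp only [List.nil_append] at hinner
    simp only [List.foldl_cons]
    rw [hinner]
    rw [ih _ _ (fun it hit => hnd it (by simp [hit]))]
    rw [pvSpecRun_congr (fun k => pv_lookup_updD item d hitem k) rest]
    simp [pvSpecRun, List.append_assoc]

theorem pv_A_eq_spec (items : List (List (String × Option String)))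
    (hnd : ∀ it ∈ items, (it.map Prod.fst).Nodup) :
    process_tcmb_items items = pvSpecRun (fun _ => none) items := by
  unfold process_tcmb_items
  by_cases h : items = []
  · subst h; simp [pvSpecRun]
  · rw [if_neg h, pv_outerA items [] [] hnd]
    have hc : pvSpecRun (fun k => List.lookup k ([] : List (String × String))) items
        = pvSpecRun (fun _ => none) items :=
      pvSpecRun_congr (fun _ => rfl) items
    rw [hc]
    simp

-- ===== B side =====

-- partial fill: only the keys in K have been forward-filled; g carries last-known
def pvApplyA (g : String → Option String) (K : List String) : List (List (String × Option String)) → List (List (String × Option String))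
  | [] => []
  | it :: rest =>
    it.map (fun kv => if kv.1 ∈ K then (kv.1, kv.2.or (g kv.1)) else kv)
      :: pvApplyA (pvUpdF g it) K rest

theorem pvApplyA_nil (g : String → Option String) (its : List (List (String × Option String))) :
    pvApplyA g [] its = its := by
  induction its generalizing g with
  | nil => rfl
  | cons it rest ih => simp [pvApplyA, ih]

-- first-occurrence decomposition of a successful lookup
theorem pv_lookup_decomp {a : Type} {k : String} {v : a} {l : List (String × a)}
    (h : List.lookup k l = some v) :
    ∃ u t, l = u ++ (k, v) :: t ∧ k ∉ u.map Prod.fst := by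
  induction l with
  | nil => simp [List.lookup] at h
  | cons kv rest ih =>
    obtain ⟨k1, v1⟩ := kv
    by_cases he : k = k1
    · have hb : (k == k1) = true := beq_iff_eq.mpr he
      simp only [List.lookup, hb] at h
      subst he
      refine ⟨[], rest, ?_, by simp⟩
      simp only [Option.some.injEq] at h
      simp [h]
    · have hb : (k == k1) = false := beq_eq_false_iff_ne.mpr he
      simp only [List.lookup, hb] at h
      obtain ⟨u, t, hl, hu⟩ := ih h
      refine ⟨(k1, v1) :: u, t, by simp [hl], ?_⟩
      simp only [List.map_cons, List.mem_cons, not_or]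
      exact ⟨he, hu⟩

theorem pv_lookup_of_mem_nodup {a : Type} {l : List (String × a)} {kv : String × a}
    (hnd : (l.map Prod.fst).Nodup) (hm : kv ∈ l) :
    List.lookup kv.1 l = some kv.2 := by
  induction l with
  | nil => simp at hm
  | cons hd rest ih =>
    simp only [List.map_cons, List.nodup_cons] at hnd
    rcases List.mem_cons.1 hm with h | h
    · subst h; simp [List.lookup]
    · have hne : kv.1 ≠ hd.1 := fun e => hnd.1 (e ▸ List.mem_map_of_mem h)
      have hb : (kv.1 == hd.1) = false := beq_eq_false_iff_ne.mpr hne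
      simp only [List.lookup, hb]
      exact ih hnd.2 h

-- keys of a partially filled row are the row's keys
theorem pv_rowmap_keys (g : String → Option String) (J : List String) (l : List (String × Option String)) :
    (l.map (fun kv => if kv.1 ∈ J then (kv.1, kv.2.or (g kv.1)) else kv)).map Prod.fst
      = l.map Prod.fst := by
  rw [List.map_map]
  exact List.map_congr_left (fun kv _ => by by_cases h : kv.1 ∈ J <;> simp [h])

-- one pvFFCol pass adds exactly one key to the filled set
theorem pv_stepB (its : List (List (String × Option String))) (g : String → Option String)
    (J : List String) (key : String) (hJ : key ∉ J)
    (hnd : ∀ it ∈ its, (it.map Prod.fst).Nodup) :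
    pvFFCol key (g key) (its.zip (pvApplyA g J its)) = pvApplyA g (J ++ [key]) its := by
  induction its generalizing g with
  | nil => rfl
  | cons it rest ih =>
    have hit : (it.map Prod.fst).Nodup := hnd it (by simp)
    have hrest : ∀ x ∈ rest, (x.map Prod.fst).Nodup := fun x hx => hnd x (by simp [hx])
    have hrow_ne : ∀ kv ∈ it, kv.1 ≠ key →
        (if kv.1 ∈ J ++ [key] then (kv.1, kv.2.or (g kv.1)) else kv)
        = (if kv.1 ∈ J then (kv.1, kv.2.or (g kv.1)) else kv) := by
      intro kv _ hne
      by_cases hmem : kv.1 ∈ J <;> simp [hmem, hne]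
    simp only [pvApplyA, List.zip_cons_cons, pvFFCol]
    cases hl : List.lookup key it with
    | none =>
      have hnotin : ∀ kv ∈ it, kv.1 ≠ key := by
        intro kv hm e
        have h5 := pv_lookup_of_mem_nodup hit hm
        rw [e, hl] at h5
        simp at h5
      have hg' : pvUpdF g it key = g key := by
        simp [pvUpdF, hl]
      rw [← hg', ih (pvUpdF g it) hrest]
      simp only [pvApplyA, List.cons.injEq]
      exact ⟨List.map_congr_left (fun kv hm => (hrow_ne kv hm (hnotin kv hm)).symm), trivial⟩
    | some v0 =>
      cases v0 with
      | some v =>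
        have hg' : pvUpdF g it key = some v := by simp [pvUpdF, hl]
        have hrow : it.map (fun kv => if kv.1 ∈ J ++ [key] then (kv.1, kv.2.or (g kv.1)) else kv)
            = it.map (fun kv => if kv.1 ∈ J then (kv.1, kv.2.or (g kv.1)) else kv) := by
          refine List.map_congr_left (fun kv hm => ?_)
          by_cases he : kv.1 = key
          · have h2 : kv.2 = some v := by
              have h5 := pv_lookup_of_mem_nodup hit hm
              rw [he, hl] at h5
              exact (Option.some.inj h5).symm
            by_cases hmem : kv.1 ∈ J <;> simp [hmem, he, h2, Prod.ext_iff]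
          · exact hrow_ne kv hm he
        have hih := ih (pvUpdF g it) hrest
        rw [hg'] at hih
        refine Eq.trans (b := it.map (fun kv => if kv.1 ∈ J then (kv.1, kv.2.or (g kv.1)) else kv)
            :: pvFFCol key (some v) (rest.zip (pvApplyA (pvUpdF g it) J rest))) rfl ?_
        rw [hih, hrow]
      | none =>
        have hg' : pvUpdF g it key = g key := by simp [pvUpdF, hl]
        cases hgk : g key with
        | none =>
          have hrow : it.map (fun kv => if kv.1 ∈ J ++ [key] then (kv.1, kv.2.or (g kv.1)) else kv)
              = it.map (fun kv => if kv.1 ∈ J then (kv.1, kv.2.or (g kv.1)) else kv) := by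
            refine List.map_congr_left (fun kv hm => ?_)
            by_cases he : kv.1 = key
            · have h2 : kv.2 = none := by
                have h5 := pv_lookup_of_mem_nodup hit hm
                rw [he, hl] at h5
                exact (Option.some.inj h5).symm
              by_cases hmem : kv.1 ∈ J <;> simp [hmem, he, h2, hgk, Prod.ext_iff]
            · exact hrow_ne kv hm he
          have hih := ih (pvUpdF g it) hrest
          rw [hg', hgk] at hih
          refine Eq.trans (b := it.map (fun kv => if kv.1 ∈ J then (kv.1, kv.2.or (g kv.1)) else kv)
              :: pvFFCol key none (rest.zip (pvApplyA (pvUpdF g it) J rest))) rfl ?_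
          rw [hih, hrow]
        | some w =>
          obtain ⟨u, t, hdec, hu⟩ := pv_lookup_decomp hl
          have hne_u : ∀ kv ∈ u, kv.1 ≠ key := by
            intro kv hm e
            exact hu (by rw [← e]; exact List.mem_map_of_mem hm)
          have htk : key ∉ t.map Prod.fst := by
            have h5 := hit
            rw [hdec] at h5
            simp only [List.map_append, List.map_cons, List.nodup_append, List.nodup_cons] at h5
            exact h5.2.1.1
          have hne_t : ∀ kv ∈ t, kv.1 ≠ key := by
            intro kv hm e
            exact htk (by rw [← e]; exact List.mem_map_of_mem hm)
          have hrow : pvSetKey key (some w) (it.map (fun kv => if kv.1 ∈ J then (kv.1, kv.2.or (g kv.1)) else kv))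
              = it.map (fun kv => if kv.1 ∈ J ++ [key] then (kv.1, kv.2.or (g kv.1)) else kv) := by
            rw [hdec]
            simp only [List.map_append, List.map_cons]
            rw [pv_setKey_append_of_not_mem (by rw [pv_rowmap_keys]; exact hu)]
            congr 1
            · exact List.map_congr_left (fun kv hm => by
                by_cases hmem : kv.1 ∈ J <;> simp [hmem, hne_u kv hm])
            · rw [if_neg hJ]
              simp only [pvSetKey, if_pos]
              rw [if_pos (show (key : String) ∈ J ++ [key] by simp)]
              simp only [Option.none_or, hgk, List.cons.injEq]
              refine ⟨by simp, List.map_congr_left (fun kv hm => by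
                by_cases hmem : kv.1 ∈ J <;> simp [hmem, hne_t kv hm])⟩
          have hih := ih (pvUpdF g it) hrest
          rw [hg', hgk] at hih
          refine Eq.trans (b := pvSetKey key (some w) (it.map (fun kv => if kv.1 ∈ J then (kv.1, kv.2.or (g kv.1)) else kv))
              :: pvFFCol key (some w) (rest.zip (pvApplyA (pvUpdF g it) J rest))) rfl ?_
          rw [hih, hrow]

theorem pv_foldB (its : List (List (String × Option String)))
    (hnd : ∀ it ∈ its, (it.map Prod.fst).Nodup) :
    ∀ (K J : List String), (J ++ K).Nodup →
    K.foldl (fun res key => pvFFCol key none (its.zip res)) (pvApplyA (fun _ => none) J its)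
      = pvApplyA (fun _ => none) (J ++ K) its := by
  intro K
  induction K with
  | nil => intro J _; simp
  | cons key K' ih =>
    intro J hJK
    have hkey : key ∉ J := by
      simp only [List.nodup_append] at hJK
      exact fun hm => hJK.2.2 key hm key (by simp) rfl
    simp only [List.foldl_cons]
    rw [show (none : Option String) = (fun _ => (none : Option String)) key from rfl,
        pv_stepB its (fun _ => none) J key hkey hnd,
        ih (J ++ [key]) (by simpa [List.append_assoc] using hJK)]
    simp [List.append_assoc]

theorem pvApplyA_full (its : List (List (String × Option String))) (g : String → Option String)
    (K : List String) (hK : ∀ it ∈ its, ∀ kv ∈ it, kv.1 ∈ K) :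
    pvApplyA g K its = pvSpecRun g its := by
  induction its generalizing g with
  | nil => rfl
  | cons it rest ih =>
    simp only [pvApplyA, pvSpecRun, List.cons.injEq]
    constructor
    · exact List.map_congr_left (fun kv hm => by simp [hK it (by simp) kv hm, pvFillOne])
    · exact ih _ (fun x hx kv hm => hK x (by simp [hx]) kv hm)

theorem pv_B_eq_spec (items : List (List (String × Option String)))
    (hnd : ∀ it ∈ items, (it.map Prod.fst).Nodup) :
    process_tcmb_items_alt items = pvSpecRun (fun _ => none) items := by
  have hdef : process_tcmb_items_alt items
      = (PySem.List.dedup (items.flatMap fun item => item.map Prod.fst)).foldl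
          (fun res key => pvFFCol key none (items.zip res)) items := rfl
  have hF := pv_foldB items hnd
    (PySem.List.dedup (items.flatMap fun item => item.map Prod.fst)) []
    (by simpa using PySem.List.nodup_dedup (items.flatMap fun item => item.map Prod.fst))
  rw [pvApplyA_nil] at hF
  rw [hdef, hF, List.nil_append]
  exact pvApplyA_full items _ _ (fun it hit kv hm => by
    rw [PySem.List.mem_dedup]
    exact List.mem_flatMap.2 ⟨it, hit, List.mem_map_of_mem hm⟩)

-- ===== VERDICT (by name: the statement is the Claim_ definition above) =====
theorem process_tcmb_items_spec : Claim_equal_process_tcmb_items := by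
  intro items _ hpre
  unfold Spec_process_tcmb_items
  rw [pv_A_eq_spec items hpre, pv_B_eq_spec items hpre]
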